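-- pv_equiv track=rewrite | github.com/jezinka/advent_2022 | main/aoc_21b.py | find_brackets_index
-- ===== SOURCE A (Python) =====
-- def find_brackets_index(operation1):
--     number_of_brackets = sum([1 for n in operation1[:operation1.index('x')] if n == '('])
--     left_index = operation1.index('x')
--     right_index = operation1.index('x')
--     i = 0
--     while i < number_of_brackets:
--
--         left_founded = False
--         right_founded = False
--
--         while not left_founded:
--             left_index -= 1
--             if operation1[left_index] == '(':
--                 left_founded = True
--
--         while not right_founded:
--             right_index += 1
--             if operation1[right_index] == ')':
--                 right_founded = True
--         i += 1
--     return left_index, right_index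
-- ===== SOURCE B (Python) =====
-- def find_brackets_index(operation1):
--     idx = operation1.index('x')
--     k = operation1[:idx].count('(')
--     if k == 0:
--         return idx, idx
--     lefts = [i for i in range(idx) if operation1[i] == '(']
--     rights = [i for i in range(idx + 1, len(operation1)) if operation1[i] == ')']
--     return lefts[-k], rights[k - 1]
-- ===== Notes on version B (the rewrite author's own statement) =====
-- stated objective: simpler
-- what changed: A's k nested directional while-scans (walk left to the previous '(' and right to the next ')', repeated k times) are replaced by building the '(' / ')' position lists once in single passes and selecting lefts[-k] and rights[k-1] directly.
import Mathlib
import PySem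

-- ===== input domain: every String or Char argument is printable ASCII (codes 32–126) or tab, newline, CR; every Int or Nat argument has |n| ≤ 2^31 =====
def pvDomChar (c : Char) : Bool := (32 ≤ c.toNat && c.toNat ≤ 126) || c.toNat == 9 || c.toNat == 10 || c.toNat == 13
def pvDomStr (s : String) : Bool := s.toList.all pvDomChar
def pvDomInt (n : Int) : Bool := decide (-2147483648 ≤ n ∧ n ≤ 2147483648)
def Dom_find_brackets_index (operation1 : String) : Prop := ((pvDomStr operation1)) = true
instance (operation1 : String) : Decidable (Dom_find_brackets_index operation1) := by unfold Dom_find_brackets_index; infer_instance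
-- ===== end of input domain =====

-- B replaces A's nested directional while-scans by building the bracket-position index lists
-- in single passes and selecting the answer directly (objective: simpler).

-- ===== PORT A =====
-- inner `while not left_founded` loop; fuel only makes the recursion total — a `none` from
-- pyGet? is Python's IndexError / never reached inside Pre_.
def pvLeftScan (cs : List Char) : Nat → Int → Int
  | 0, li => li
  | f+1, li =>
    match PySem.List.pyGet? cs (li - 1) with
    | some c => if c = '(' then li - 1 else pvLeftScan cs f (li - 1)
    | none => li - 1

-- inner `while not right_founded` loop
def pvRightScan (cs : List Char) : Nat → Int → Int
  | 0, ri => ri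
  | f+1, ri =>
    match PySem.List.pyGet? cs (ri + 1) with
    | some c => if c = ')' then ri + 1 else pvRightScan cs f (ri + 1)
    | none => ri + 1

-- outer `while i < number_of_brackets` loop
def pvOuter (cs : List Char) : Nat → Int → Int → Int × Int
  | 0, li, ri => (li, ri)
  | i+1, li, ri => pvOuter cs i (pvLeftScan cs (cs.length + 1) li) (pvRightScan cs (cs.length + 1) ri)

def find_brackets_index (operation1 : String) : Int × Int :=
  let cs := operation1.toList
  -- operation1.index('x'); the ValueError when 'x' is absent is excluded by Pre_
  let idx : Nat := (PySem.List.index? cs 'x').getD 0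
  -- sum([1 for n in operation1[:idx] if n == '('])
  let number_of_brackets : Nat := ((PySem.List.slice cs none (some (idx : Int))).filter (fun n => n == '(')).length
  pvOuter cs number_of_brackets (idx : Int) (idx : Int)

-- ===== PORT B =====
def find_brackets_index_alt (operation1 : String) : Int × Int :=
  let cs := operation1.toList
  let idx : Nat := (PySem.List.index? cs 'x').getD 0
  let k : Nat := PySem.List.count (PySem.List.slice cs none (some (idx : Int))) '('
  if k = 0 then ((idx : Int), (idx : Int))
  else
    let lefts : List Int := (PySem.List.pyRange 0 (idx : Int)).filter (fun i => PySem.List.pyGet? cs i == some '(')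
    let rights : List Int := (PySem.List.pyRange ((idx : Int) + 1) (cs.length : Int)).filter (fun i => PySem.List.pyGet? cs i == some ')')
    ((PySem.List.pyGet? lefts (-(k : Int))).getD 0, (PySem.List.pyGet? rights ((k : Int) - 1)).getD 0)

-- ===== PRECONDITION & SPEC =====
-- Pre_ excludes exactly the inputs on which A raises: strings without 'x' (ValueError from
-- .index) and strings with fewer ')' after the 'x' than '(' before it (IndexError in the
-- rightward scan).
def Pre_find_brackets_index (operation1 : String) : Prop :=
  'x' ∈ operation1.toList ∧
  (operation1.toList.take (operation1.toList.idxOf 'x')).count '(' ≤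
    (operation1.toList.drop (operation1.toList.idxOf 'x' + 1)).count ')'
instance (operation1 : String) : Decidable (Pre_find_brackets_index operation1) := by unfold Pre_find_brackets_index; infer_instance

def pvWitness_find_brackets_index : String := "(1+x)"

def Spec_find_brackets_index (operation1 : String) (out : Int × Int) : Prop := out = find_brackets_index_alt operation1
instance (operation1 : String) (out : Int × Int) : Decidable (Spec_find_brackets_index operation1 out) := by unfold Spec_find_brackets_index; infer_instance

-- ===== CLAIM (what is proved, stated in full; the proofs are below) =====
def Claim_equal_find_brackets_index : Prop := ∀ (operation1 : String), Dom_find_brackets_index operation1 → Pre_find_brackets_index operation1 → Spec_find_brackets_index operation1 (find_brackets_index operation1)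

-- ===== LEMMAS AND PROOFS =====

-- positions of '(' strictly below b
def pvL (cs : List Char) (b : Nat) : List Nat := (List.range b).filter (fun i => cs[i]? == some '(')
-- positions of ')' strictly above r (and below cs.length)
def pvR (cs : List Char) (r : Nat) : List Nat := (List.range' (r+1) (cs.length - (r+1))).filter (fun i => cs[i]? == some ')')

-- the left / right components of pvOuter evolve independently
def pvLIter (cs : List Char) : Nat → Int → Int
  | 0, li => li
  | m+1, li => pvLIter cs m (pvLeftScan cs (cs.length + 1) li)
def pvRIter (cs : List Char) : Nat → Int → Int
  | 0, ri => ri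
  | m+1, ri => pvRIter cs m (pvRightScan cs (cs.length + 1) ri)

theorem pvOuter_eq (cs : List Char) : ∀ (m : Nat) (li ri : Int),
    pvOuter cs m li ri = (pvLIter cs m li, pvRIter cs m ri) := by
  intro m
  induction m with
  | zero => intro li ri; rfl
  | succ m ih => intro li ri; simp [pvOuter, pvLIter, pvRIter, ih]

theorem pvLeftScan_eq (cs : List Char) (j : Nat) :
    ∀ (fuel b : Nat), j < b → b ≤ cs.length → cs[j]? = some '(' →
    (∀ m, j < m → m < b → ¬ (cs[m]? = some '(')) → b - j ≤ fuel →
    pvLeftScan cs fuel (b : Int) = (j : Int) := by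
  intro fuel
  induction fuel with
  | zero => intro b h1 _ _ _ h5; omega
  | succ f ih =>
    intro b h1 h2 h3 h4 h5
    have hb1 : ((b : Int) - 1) = ((b - 1 : Nat) : Int) := by omega
    have hlt : b - 1 < cs.length := by omega
    have hget : PySem.List.pyGet? cs ((b : Int) - 1) = some cs[b-1] := by
      rw [hb1, PySem.List.pyGet?_natCast, List.getElem?_eq_getElem hlt]
    by_cases hbj : b - 1 = j
    · have : cs[b-1] = '(' := by
        have := h3; rw [← hbj] at this
        rw [List.getElem?_eq_getElem hlt] at this
        exact Option.some.inj this
      rw [pvLeftScan, hget]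
      simp only [this, if_true]
      omega
    · have hne : ¬ (cs[b-1] = '(') := by
        intro hc
        exact h4 (b-1) (by omega) (by omega) (by rw [List.getElem?_eq_getElem hlt, hc])
      rw [pvLeftScan, hget]
      simp only [hne, if_false, hb1]
      exact ih (b-1) (by omega) (by omega) h3 (fun m hm1 hm2 => h4 m hm1 (by omega)) (by omega)

theorem pvRightScan_eq (cs : List Char) (j : Nat) :
    ∀ (fuel r : Nat), r < j → j < cs.length → cs[j]? = some ')' →
    (∀ m, r < m → m < j → ¬ (cs[m]? = some ')')) → j - r ≤ fuel →
    pvRightScan cs fuel (r : Int) = (j : Int) := by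
  intro fuel
  induction fuel with
  | zero => intro r h1 _ _ _ h5; omega
  | succ f ih =>
    intro r h1 h2 h3 h4 h5
    have hr1 : ((r : Int) + 1) = ((r + 1 : Nat) : Int) := by omega
    have hlt : r + 1 < cs.length := by omega
    have hget : PySem.List.pyGet? cs ((r : Int) + 1) = some cs[r+1] := by
      rw [hr1, PySem.List.pyGet?_natCast, List.getElem?_eq_getElem hlt]
    by_cases hrj : r + 1 = j
    · have : cs[r+1] = ')' := by
        have := h3; rw [← hrj] at this
        rw [List.getElem?_eq_getElem hlt] at this
        exact Option.some.inj this
      rw [pvRightScan, hget]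
      simp only [this, if_true]
      omega
    · have hne : ¬ (cs[r+1] = ')') := by
        intro hc
        exact h4 (r+1) (by omega) (by omega) (by rw [List.getElem?_eq_getElem hlt, hc])
      rw [pvRightScan, hget]
      simp only [hne, if_false, hr1]
      exact ih (r+1) (by omega) h2 h3 (fun m hm1 hm2 => h4 m (by omega) hm2) (by omega)

-- a run of range' whose only p-position is its last element filters to that element
theorem pvFilter_range'_last (p : Nat → Bool) :
    ∀ (len a : Nat), 0 < len → p (a + len - 1) = true →
    (∀ m, a ≤ m → m < a + len - 1 → p m = false) →
    (List.range' a len).filter p = [a + len - 1] := by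
  intro len
  induction len with
  | zero => intro a h; omega
  | succ l ih =>
    intro a _ hp hn
    rw [List.range'_succ]
    cases l with
    | zero => simp_all [List.filter]
    | succ l' =>
      have hpa : p a = false := hn a (le_refl a) (by omega)
      rw [List.filter_cons_of_neg (by simp [hpa])]
      have := ih (a+1) (by omega) (by have : a + 1 + (l' + 1) - 1 = a + (l' + 1 + 1) - 1 := by omega
                                      rw [this]; exact hp)
                  (fun m hm1 hm2 => hn m (by omega) (by omega))
      rw [this]
      congr 1
      omega

-- a run of range' with no p-position filters to []
theorem pvFilter_range'_nil (p : Nat → Bool) (a len : Nat)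
    (hn : ∀ m, a ≤ m → m < a + len → p m = false) :
    (List.range' a len).filter p = [] := by
  rw [List.filter_eq_nil_iff]
  intro m hm
  rw [List.mem_range'_1] at hm
  simp [hn m hm.1 hm.2]

-- decomposition of pvL at its last element
theorem pvL_decomp (cs : List Char) (b : Nat) (hb : b ≤ cs.length) (hne : pvL cs b ≠ []) :
    ∃ l j, pvL cs b = l ++ [j] ∧ j < b ∧ cs[j]? = some '(' ∧
      (∀ m, j < m → m < b → ¬ (cs[m]? = some '(')) ∧ pvL cs j = l := by
  obtain ⟨l, j, hlj⟩ : ∃ l j, pvL cs b = l ++ [j] :=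
    ⟨(pvL cs b).dropLast, (pvL cs b).getLast hne, (List.dropLast_concat_getLast hne).symm⟩
  have hpair : (pvL cs b).Pairwise (· < ·) :=
    List.Pairwise.filter _ List.pairwise_lt_range
  have hjmem : j ∈ pvL cs b := by rw [hlj]; simp
  unfold pvL at hjmem
  have hjmem' := List.mem_filter.mp hjmem
  have hjb : j < b := List.mem_range.mp hjmem'.1
  have hjp : cs[j]? = some '(' := by simpa using hjmem'.2
  have hmax : ∀ m, j < m → m < b → ¬ (cs[m]? = some '(') := by
    intro m hm1 hm2 hc
    have hmmem : m ∈ pvL cs b := by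
      unfold pvL
      rw [List.mem_filter]
      exact ⟨List.mem_range.mpr hm2, by simp [hc]⟩
    rw [hlj] at hmmem hpair
    rcases List.mem_append.mp hmmem with h | h
    · rw [List.pairwise_append] at hpair
      have := hpair.2.2 m h j (by simp)
      omega
    · simp at h; omega
  refine ⟨l, j, hlj, hjb, hjp, hmax, ?_⟩
  have hsplit : List.range b = List.range j ++ List.range' j (b - j) := by
    rw [List.range_eq_range', List.range_eq_range']
    have h := List.range'_append (s := 0) (m := j) (n := b - j) (step := 1)
    simp only [one_mul, Nat.zero_add] at h
    rw [h]
    congr 1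
    omega
  have hfil : (List.range' j (b - j)).filter (fun i => cs[i]? == some '(') = [j] := by
    have hbj : b - j = 1 + (b - j - 1) := by omega
    have h := List.range'_append (s := j) (m := 1) (n := b - j - 1) (step := 1)
    simp only [mul_one] at h
    rw [hbj, ← h]
    simp only [List.filter_append, List.range'_one]
    rw [pvFilter_range'_nil _ (j+1) (b - j - 1)
        (fun m hm1 hm2 => by simpa using hmax m (by omega) (by omega))]
    simp [hjp]
  have : pvL cs b = pvL cs j ++ [j] := by
    unfold pvL
    rw [hsplit, List.filter_append, hfil]
  rw [hlj] at this
  exact (List.append_cancel_right this).symm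

-- decomposition of pvR at its head
theorem pvR_decomp (cs : List Char) (r : Nat) (hne : pvR cs r ≠ []) :
    ∃ j rest, pvR cs r = j :: rest ∧ r < j ∧ j < cs.length ∧ cs[j]? = some ')' ∧
      (∀ m, r < m → m < j → ¬ (cs[m]? = some ')')) ∧ pvR cs j = rest := by
  obtain ⟨j, rest, hjr⟩ : ∃ j rest, pvR cs r = j :: rest := by
    cases h : pvR cs r with
    | nil => exact absurd h hne
    | cons a t => exact ⟨a, t, rfl⟩
  have hpair : (pvR cs r).Pairwise (· < ·) :=
    List.Pairwise.filter _ (List.pairwise_lt_range' 1)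
  have hjmem : j ∈ pvR cs r := by rw [hjr]; simp
  unfold pvR at hjmem
  have hjmem' := List.mem_filter.mp hjmem
  have hjrange := List.mem_range'_1.mp hjmem'.1
  have hrj : r < j := by omega
  have hjn : j < cs.length := by omega
  have hjp : cs[j]? = some ')' := by simpa using hjmem'.2
  have hmin : ∀ m, r < m → m < j → ¬ (cs[m]? = some ')') := by
    intro m hm1 hm2 hc
    have hmmem : m ∈ pvR cs r := by
      unfold pvR
      rw [List.mem_filter]
      exact ⟨List.mem_range'_1.mpr ⟨by omega, by omega⟩, by simp [hc]⟩
    rw [hjr] at hmmem hpair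
    rcases List.mem_cons.mp hmmem with h | h
    · omega
    · have := (List.pairwise_cons.mp hpair).1 m h
      omega
  refine ⟨j, rest, hjr, hrj, hjn, hjp, hmin, ?_⟩
  have hsplit : List.range' (r+1) (cs.length - (r+1)) =
      List.range' (r+1) (j - r) ++ List.range' (j+1) (cs.length - (j+1)) := by
    have h := List.range'_append (s := r+1) (m := j - r) (n := cs.length - (j+1)) (step := 1)
    simp only [one_mul] at h
    rw [show r + 1 + (j - r) = j + 1 by omega] at h
    rw [h]
    congr 1
    omega
  have hfil : (List.range' (r+1) (j - r)).filter (fun i => cs[i]? == some ')') = [j] := by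
    have h := pvFilter_range'_last (fun i => cs[i]? == some ')') (j - r) (r+1)
      (by omega)
      (by rw [show r + 1 + (j - r) - 1 = j by omega]; simp [hjp])
      (fun m hm1 hm2 => by simpa using hmin m (by omega) (by omega))
    rw [h, show r + 1 + (j - r) - 1 = j by omega]
  have : pvR cs r = [j] ++ pvR cs j := by
    unfold pvR
    rw [hsplit, List.filter_append, hfil]
  rw [hjr] at this
  simpa using this.symm

theorem pvLIter_eq (cs : List Char) :
    ∀ (m b : Nat), b ≤ cs.length → (pvL cs b).length = m → 0 < m →
    pvLIter cs m (b : Int) = (((pvL cs b).headI : Nat) : Int) := by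
  intro m
  induction m with
  | zero => intro b _ _ h; omega
  | succ m ih =>
    intro b hb hlen _
    have hne : pvL cs b ≠ [] := by
      intro h; rw [h] at hlen; simp at hlen
    obtain ⟨l, j, hlj, hjb, hjp, hmax, hLj⟩ := pvL_decomp cs b hb hne
    have hscan : pvLeftScan cs (cs.length + 1) (b : Int) = (j : Int) :=
      pvLeftScan_eq cs j (cs.length + 1) b hjb hb hjp hmax (by omega)
    rw [pvLIter, hscan]
    cases m with
    | zero =>
      have : l = [] := by
        have := hlen; rw [hlj] at this; simp at this
        exact this
      rw [pvLIter, hlj, this]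
      simp
    | succ m' =>
      have hlne : l ≠ [] := by
        intro h; rw [hlj, h] at hlen; simp at hlen
      have hjlen : (pvL cs j).length = m' + 1 := by
        rw [hLj]
        have := hlen; rw [hlj] at this; simp at this
        omega
      rw [ih j (by omega) hjlen (by omega), hLj, hlj]
      cases l with
      | nil => exact absurd rfl hlne
      | cons a t => rfl

theorem pvRIter_eq (cs : List Char) :
    ∀ (m r : Nat), r < cs.length → m ≤ (pvR cs r).length → 0 < m →
    pvRIter cs m (r : Int) = (((pvR cs r).getD (m-1) 0 : Nat) : Int) := by
  intro m
  induction m with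
  | zero => intro r _ _ h; omega
  | succ m ih =>
    intro r hr hlen _
    have hne : pvR cs r ≠ [] := by
      intro h; rw [h] at hlen; simp at hlen
    obtain ⟨j, rest, hjr, hrj, hjn, hjp, hmin, hRj⟩ := pvR_decomp cs r hne
    have hscan : pvRightScan cs (cs.length + 1) (r : Int) = (j : Int) :=
      pvRightScan_eq cs j (cs.length + 1) r hrj hjn hjp hmin (by omega)
    rw [pvRIter, hscan]
    cases m with
    | zero =>
      rw [pvRIter, hjr]
      simp
    | succ m' =>
      have hrest : m' + 1 ≤ (pvR cs j).length := by
        rw [hRj]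
        have := hlen; rw [hjr] at this; simp at this
        omega
      rw [ih j hjn hrest (by omega), hRj, hjr]
      simp

theorem pvCountP_range (cs : List Char) (c : Char) :
    ∀ (b : Nat), b ≤ cs.length →
    (List.range b).countP (fun i => cs[i]? == some c) = (cs.take b).count c := by
  intro b
  induction b with
  | zero => intro _; simp
  | succ b ih =>
    intro hb
    have hlt : b < cs.length := by omega
    rw [List.range_succ, List.countP_append, ih (by omega),
        List.take_succ_eq_append_getElem hlt, List.count_append]
    simp [List.countP_cons, List.count_cons, List.getElem?_eq_getElem hlt, BEq.comm]

theorem pvCountP_range' (cs : List Char) (c : Char) :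
    ∀ (len a : Nat), a + len ≤ cs.length →
    (List.range' a len).countP (fun i => cs[i]? == some c) = ((cs.drop a).take len).count c := by
  intro len
  induction len with
  | zero => intro a _; simp
  | succ len ih =>
    intro a ha
    have hlt : a < cs.length := by omega
    have hdrop : (cs.drop a).take (len+1) = cs[a] :: (cs.drop (a+1)).take len := by
      rw [List.drop_eq_getElem_cons hlt, List.take_succ_cons]
    rw [List.range'_succ, List.countP_cons, ih (a+1) (by omega), hdrop, List.count_cons]
    by_cases hc : cs[a] = c
    · simp [List.getElem?_eq_getElem hlt, hc]
    · simp [List.getElem?_eq_getElem hlt, hc]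

theorem pvPyRange_eq_range' : ∀ (len a : Nat),
    PySem.List.pyRange (a : Int) ((a + len : Nat) : Int) = (List.range' a len).map (fun i : Nat => (i : Int)) := by
  intro len
  induction len with
  | zero => intro a; simp [PySem.List.pyRange]
  | succ len ih =>
    intro a
    rw [PySem.List.pyRange_one_cons (by omega)]
    have h1 : (a : Int) + 1 = ((a + 1 : Nat) : Int) := by omega
    have h2 : ((a + (len + 1) : Nat) : Int) = (((a + 1) + len : Nat) : Int) := by omega
    rw [h1, h2, ih (a+1), List.range'_succ]
    simp

-- bridge facts used by the final assembly
theorem pvNegIndex (l : List Int) (k : Nat) (h : l.length = k) (h2 : 0 < k) :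
    PySem.List.pyGet? l (-(k:Int)) = l[0]? := by
  unfold PySem.List.pyGet? PySem.List.pyIdx?
  rw [if_neg (by omega : ¬ (0:Int) ≤ -(k:Int)), if_pos (by omega : -(l.length:Int) ≤ -(k:Int))]
  simp [h]

theorem pvPosIndex (l : List Int) (k : Nat) (h2 : 0 < k) :
    PySem.List.pyGet? l ((k:Int)-1) = l[k-1]? := by
  rw [show ((k:Int) - 1) = ((k-1 : Nat) : Int) from by omega, PySem.List.pyGet?_natCast]

-- ===== VERDICT (by name: the statement is the Claim_ definition above) =====
theorem find_brackets_index_spec : Claim_equal_find_brackets_index := by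
  intro s _ hpre
  unfold Spec_find_brackets_index find_brackets_index find_brackets_index_alt
  obtain ⟨hx, hcnt⟩ := hpre
  have hsome : (PySem.List.index? s.toList 'x').isSome :=
    (PySem.List.index?_isSome_iff s.toList 'x').mpr hx
  obtain ⟨idx, hidx⟩ := Option.isSome_iff_exists.mp hsome
  obtain ⟨pre, suf, hcs, hplen, hnx⟩ := (PySem.List.index?_eq_some_iff s.toList 'x' idx).mp hidx
  have hidxOf : s.toList.idxOf 'x' = idx := by
    rw [hcs, ← hplen]; simp [List.idxOf_append, hnx]
  have hidxlt : idx < s.toList.length := by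
    rw [hcs]; rw [List.length_append]; simp; omega
  have hslice : PySem.List.slice s.toList none (some (idx : Int)) = s.toList.take idx := by
    rw [PySem.List.slice_to s.toList (by omega)]; simp
  have hKfil : ((s.toList.take idx).filter (fun n => n == '(')).length = (s.toList.take idx).count '(' := by
    rw [← List.countP_eq_length_filter]; rfl
  have hKcount : PySem.List.count (s.toList.take idx) '(' = (s.toList.take idx).count '(' := by
    simp [PySem.List.count]
  set K := (s.toList.take idx).count '(' with hK
  have hLlen : (pvL s.toList idx).length = K := by
    unfold pvL
    rw [← List.countP_eq_length_filter]
    exact pvCountP_range s.toList '(' idx (by omega)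
  have hRlen : (pvR s.toList idx).length = (s.toList.drop (idx+1)).count ')' := by
    unfold pvR
    rw [← List.countP_eq_length_filter,
        pvCountP_range' s.toList ')' (s.toList.length - (idx+1)) (idx+1) (by omega)]
    congr 1
    exact List.take_of_length_le (by simp)
  have hKle : K ≤ (pvR s.toList idx).length := by
    rw [hRlen]; rw [hidxOf] at hcnt; exact hcnt
  simp only [hidx, Option.getD_some, hslice, hKfil, hKcount]
  rw [pvOuter_eq]
  by_cases hK0 : K = 0
  · rw [if_pos hK0, hK0]
    rfl
  · rw [if_neg hK0]
    have hKpos : 0 < K := Nat.pos_of_ne_zero hK0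
    -- the index lists of B are the position lists pvL / pvR mapped to Int
    have hlefts : (PySem.List.pyRange 0 (idx : Int)).filter (fun i => PySem.List.pyGet? s.toList i == some '(')
        = (pvL s.toList idx).map (fun i : Nat => (i : Int)) := by
      rw [PySem.List.pyRange_zero_natCast, List.filter_map]
      unfold pvL
      simp only [Function.comp_def, PySem.List.pyGet?_natCast]
    have hrights : (PySem.List.pyRange ((idx : Int) + 1) (s.toList.length : Int)).filter (fun i => PySem.List.pyGet? s.toList i == some ')')
        = (pvR s.toList idx).map (fun i : Nat => (i : Int)) := by
      rw [show ((idx : Int) + 1) = ((idx + 1 : Nat) : Int) from by omega,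
          show ((s.toList.length : Nat) : Int) = (((idx + 1) + (s.toList.length - (idx+1)) : Nat) : Int) from by omega,
          pvPyRange_eq_range' (s.toList.length - (idx+1)) (idx+1), List.filter_map]
      unfold pvR
      simp only [Function.comp_def, PySem.List.pyGet?_natCast]
    rw [hlefts, hrights]
    have hLne : pvL s.toList idx ≠ [] := by
      intro h; rw [h] at hLlen; simp at hLlen; omega
    have hleft : PySem.List.pyGet? ((pvL s.toList idx).map (fun i : Nat => (i : Int))) (-(K : Int))
        = some (((pvL s.toList idx).headI : Nat) : Int) := by
      rw [pvNegIndex _ K (by simp [hLlen]) hKpos, List.getElem?_map]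
      cases h : pvL s.toList idx with
      | nil => exact absurd h hLne
      | cons a t => simp
    have hK1lt : K - 1 < (pvR s.toList idx).length := by omega
    have hright : PySem.List.pyGet? ((pvR s.toList idx).map (fun i : Nat => (i : Int))) ((K : Int) - 1)
        = some ((((pvR s.toList idx).getD (K-1) 0) : Nat) : Int) := by
      rw [pvPosIndex _ K hKpos, List.getElem?_map, List.getElem?_eq_getElem hK1lt,
          List.getD_eq_getElem _ _ hK1lt]
      simp
    rw [hleft, hright]
    simp only [Option.getD_some]
    rw [pvLIter_eq s.toList K idx (by omega) hLlen hKpos,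
        pvRIter_eq s.toList K idx hidxlt hKle hKpos]
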